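-- pv_equiv track=rewrite | github.com/rnjs5540/Baekjoon_record | 프로그래머스/1/118666. 성격 유형 검사하기/성격 유형 검사하기.py | solution
-- ===== SOURCE A (Python) =====
-- def solution(survey, choices):
--     answer = ''
--     scores = {
--         'RT':0,
--         'CF':0,
--         'JM':0,
--         'AN':0,
--     }
--
--     for s, c in zip(survey, choices):
--         c -= 4
--         if s == 'TR' or s == 'FC' or s == 'MJ' or s == 'NA':
--             c *= -1
--             # tmp = s[0]
--             # s[0] = s[1]
--             # s[1] = tmp
--             # 파이썬에선 str이 아이템 수정이 안된다네,,
--             s = s[1] + s[0]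
--         scores[s] += c
--
--     for key, val in scores.items():
--         if val <= 0:
--             answer += key[0]
--         else:
--             answer += key[1]
--
--     return answer
-- ===== SOURCE B (Python) =====
-- def solution(survey, choices):
--     answered = list(zip(survey, choices))
--
--     def score(letter):
--         return sum(4 - c for s, c in answered if c < 4 and s[0] == letter) \
--              + sum(c - 4 for s, c in answered if c > 4 and s[1] == letter)
--
--     return ''.join(x if score(x) >= score(y) else y for x, y in ('RT', 'CF', 'JM', 'AN'))
-- ===== Notes on version B (the rewrite author's own statement) =====
-- stated objective: idiomatic
-- what changed: B drops A's mutable signed-score dict with string-reversal special cases and instead computes an independent per-letter tally (sum comprehensions over s[0]/s[1] keyed by the answer side), then picks each category letter by comparing the two tallies; A raises KeyError on any zipped survey string outside the eight valid category codes, so Pre_ restricts to those.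
import Mathlib
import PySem

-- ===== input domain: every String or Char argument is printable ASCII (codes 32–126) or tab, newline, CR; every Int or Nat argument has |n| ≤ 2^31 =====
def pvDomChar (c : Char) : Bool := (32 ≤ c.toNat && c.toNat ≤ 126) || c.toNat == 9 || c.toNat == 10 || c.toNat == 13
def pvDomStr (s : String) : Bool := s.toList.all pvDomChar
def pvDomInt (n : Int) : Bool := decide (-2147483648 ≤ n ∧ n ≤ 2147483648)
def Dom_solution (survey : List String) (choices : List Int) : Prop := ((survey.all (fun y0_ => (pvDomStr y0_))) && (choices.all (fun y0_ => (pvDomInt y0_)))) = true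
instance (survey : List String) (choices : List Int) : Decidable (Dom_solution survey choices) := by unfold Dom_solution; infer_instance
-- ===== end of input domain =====

-- B replaces A's signed per-pair score dict (with its string-reversal special case) by
-- independent per-letter tallies compared pairwise — same cost, plainer decomposition.
-- Growing strings are ported as their List Char contents (exact; Lean's String.append is kernel-opaque).

-- ===== PORT A =====
-- A's loop body: c -= 4; flip sign and reverse s for the four reversed codes; scores[s] += c.
-- 'scores[s] += c' is ported as insert (getD + c): identical whenever s is a key of the dict,
-- which Pre_solution guarantees (Python raises KeyError otherwise).
def solutionStep (d : PySem.Dict String Int) (p : String × Int) : PySem.Dict String Int :=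
  let s := p.1
  let c := p.2 - 4
  let sc : String × Int :=
    if s == "TR" || s == "FC" || s == "MJ" || s == "NA" then
      (String.ofList [(PySem.Str.pyGet? s 1).getD ' ', (PySem.Str.pyGet? s 0).getD ' '], c * (-1))
    else (s, c)
  PySem.Dict.insert d sc.1 (PySem.Dict.getD d sc.1 0 + sc.2)

def solution (survey : List String) (choices : List Int) : String :=
  String.ofList ((((survey.zip choices).foldl solutionStep
      (PySem.Dict.ofList [("RT", 0), ("CF", 0), ("JM", 0), ("AN", 0)])).items).foldl
    (fun answer kv =>
      answer ++ [if kv.2 ≤ 0 then (PySem.Str.pyGet? kv.1 0).getD ' '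
                 else (PySem.Str.pyGet? kv.1 1).getD ' ']) [])

-- ===== PORT B =====
-- score(letter): the two sum-comprehensions of Source B (filter + map + sum).
def solutionScore (answered : List (String × Int)) (letter : Char) : Int :=
  ((answered.filter (fun p => p.2 < 4 && ((PySem.Str.pyGet? p.1 0).getD ' ' == letter))).map
      (fun p => 4 - p.2)).sum
  + ((answered.filter (fun p => 4 < p.2 && ((PySem.Str.pyGet? p.1 1).getD ' ' == letter))).map
      (fun p => p.2 - 4)).sum

def solution_alt (survey : List String) (choices : List Int) : String :=
  String.ofList ([('R', 'T'), ('C', 'F'), ('J', 'M'), ('A', 'N')].map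
    (fun xy => if solutionScore (survey.zip choices) xy.2 ≤ solutionScore (survey.zip choices) xy.1
               then xy.1 else xy.2))

-- ===== PRECONDITION & SPEC =====
-- Pre_ excludes exactly the inputs on which A raises: a KeyError (or IndexError in the reversal)
-- whenever a zipped survey string is not one of the eight valid category codes.
def Pre_solution (survey : List String) (choices : List Int) : Prop :=
  ∀ p ∈ survey.zip choices,
    p.1 ∈ (["RT", "TR", "CF", "FC", "JM", "MJ", "AN", "NA"] : List String)
instance (survey : List String) (choices : List Int) : Decidable (Pre_solution survey choices) := by
  unfold Pre_solution; infer_instance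

def pvWitness_solution : List String × List Int := (["RT", "TR", "CF", "NA"], [1, 5, 4, 7])

def Spec_solution (survey : List String) (choices : List Int) (out : String) : Prop :=
  out = solution_alt survey choices
instance (survey : List String) (choices : List Int) (out : String) : Decidable (Spec_solution survey choices out) := by unfold Spec_solution; infer_instance

-- ===== CLAIM (what is proved, stated in full; the proofs are below) =====
def Claim_equal_solution : Prop := ∀ (survey : List String) (choices : List Int), Dom_solution survey choices → Pre_solution survey choices → Spec_solution survey choices (solution survey choices)

-- ===== LEMMAS AND PROOFS =====

-- cons unfolding of B's score
theorem solutionScore_cons (s : String) (c : Int) (l : List (String × Int)) (x : Char) :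
    solutionScore ((s, c) :: l) x =
      (if c < 4 ∧ (PySem.Str.pyGet? s 0).getD ' ' = x then 4 - c else 0)
      + (if 4 < c ∧ (PySem.Str.pyGet? s 1).getD ' ' = x then c - 4 else 0)
      + solutionScore l x := by
  simp only [solutionScore, List.filter_cons]
  split_ifs with h1 h2 h2 <;> simp_all <;> ring

-- A's loop, on the invariant dict shape, computes B's tally differences.
set_option maxHeartbeats 2000000 in
theorem solution_loop (l : List (String × Int)) :
    ∀ (v1 v2 v3 v4 : Int),
    (∀ p ∈ l, p.1 ∈ (["RT", "TR", "CF", "FC", "JM", "MJ", "AN", "NA"] : List String)) →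
    l.foldl solutionStep (PySem.Dict.mk [("RT", v1), ("CF", v2), ("JM", v3), ("AN", v4)]) =
      PySem.Dict.mk
        [("RT", v1 + (solutionScore l 'T' - solutionScore l 'R')),
         ("CF", v2 + (solutionScore l 'F' - solutionScore l 'C')),
         ("JM", v3 + (solutionScore l 'M' - solutionScore l 'J')),
         ("AN", v4 + (solutionScore l 'N' - solutionScore l 'A'))] := by
  induction l with
  | nil => intro v1 v2 v3 v4 _; simp [solutionScore]
  | cons p t ih =>
    intro v1 v2 v3 v4 h
    obtain ⟨s, c⟩ := p
    have hs := h (s, c) (by simp)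
    have ht : ∀ q ∈ t, q.1 ∈ (["RT", "TR", "CF", "FC", "JM", "MJ", "AN", "NA"] : List String) :=
      fun q hq => h q (by simp [hq])
    fin_cases hs
    · have hstep : solutionStep (PySem.Dict.mk [("RT", v1), ("CF", v2), ("JM", v3), ("AN", v4)]) ("RT", c)
          = PySem.Dict.mk [("RT", v1 + (c - 4)), ("CF", v2), ("JM", v3), ("AN", v4)] := by
        simp [solutionStep, PySem.Dict.insert, PySem.Dict.getD, PySem.Dict.get?]
      rw [List.foldl_cons, hstep, ih _ _ _ _ ht]
      simp [solutionScore_cons, PySem.Str.pyGet?, PySem.Dict.mk.injEq, PySem.List.pyGet?,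
        PySem.List.pyIdx?]
      split_ifs <;> omega
    · have hstep : solutionStep (PySem.Dict.mk [("RT", v1), ("CF", v2), ("JM", v3), ("AN", v4)]) ("TR", c)
          = PySem.Dict.mk [("RT", v1 + (c - 4) * (-1)), ("CF", v2), ("JM", v3), ("AN", v4)] := by
        simp [solutionStep, PySem.Dict.insert, PySem.Dict.getD, PySem.Dict.get?]
      rw [List.foldl_cons, hstep, ih _ _ _ _ ht]
      simp [solutionScore_cons, PySem.Str.pyGet?, PySem.Dict.mk.injEq, PySem.List.pyGet?,
        PySem.List.pyIdx?]
      split_ifs <;> omega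
    · have hstep : solutionStep (PySem.Dict.mk [("RT", v1), ("CF", v2), ("JM", v3), ("AN", v4)]) ("CF", c)
          = PySem.Dict.mk [("RT", v1), ("CF", v2 + (c - 4)), ("JM", v3), ("AN", v4)] := by
        simp [solutionStep, PySem.Dict.insert, PySem.Dict.getD, PySem.Dict.get?]
      rw [List.foldl_cons, hstep, ih _ _ _ _ ht]
      simp [solutionScore_cons, PySem.Str.pyGet?, PySem.Dict.mk.injEq, PySem.List.pyGet?,
        PySem.List.pyIdx?]
      split_ifs <;> omega
    · have hstep : solutionStep (PySem.Dict.mk [("RT", v1), ("CF", v2), ("JM", v3), ("AN", v4)]) ("FC", c)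
          = PySem.Dict.mk [("RT", v1), ("CF", v2 + (c - 4) * (-1)), ("JM", v3), ("AN", v4)] := by
        simp [solutionStep, PySem.Dict.insert, PySem.Dict.getD, PySem.Dict.get?]
      rw [List.foldl_cons, hstep, ih _ _ _ _ ht]
      simp [solutionScore_cons, PySem.Str.pyGet?, PySem.Dict.mk.injEq, PySem.List.pyGet?,
        PySem.List.pyIdx?]
      split_ifs <;> omega
    · have hstep : solutionStep (PySem.Dict.mk [("RT", v1), ("CF", v2), ("JM", v3), ("AN", v4)]) ("JM", c)
          = PySem.Dict.mk [("RT", v1), ("CF", v2), ("JM", v3 + (c - 4)), ("AN", v4)] := by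
        simp [solutionStep, PySem.Dict.insert, PySem.Dict.getD, PySem.Dict.get?]
      rw [List.foldl_cons, hstep, ih _ _ _ _ ht]
      simp [solutionScore_cons, PySem.Str.pyGet?, PySem.Dict.mk.injEq, PySem.List.pyGet?,
        PySem.List.pyIdx?]
      split_ifs <;> omega
    · have hstep : solutionStep (PySem.Dict.mk [("RT", v1), ("CF", v2), ("JM", v3), ("AN", v4)]) ("MJ", c)
          = PySem.Dict.mk [("RT", v1), ("CF", v2), ("JM", v3 + (c - 4) * (-1)), ("AN", v4)] := by
        simp [solutionStep, PySem.Dict.insert, PySem.Dict.getD, PySem.Dict.get?]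
      rw [List.foldl_cons, hstep, ih _ _ _ _ ht]
      simp [solutionScore_cons, PySem.Str.pyGet?, PySem.Dict.mk.injEq, PySem.List.pyGet?,
        PySem.List.pyIdx?]
      split_ifs <;> omega
    · have hstep : solutionStep (PySem.Dict.mk [("RT", v1), ("CF", v2), ("JM", v3), ("AN", v4)]) ("AN", c)
          = PySem.Dict.mk [("RT", v1), ("CF", v2), ("JM", v3), ("AN", v4 + (c - 4))] := by
        simp [solutionStep, PySem.Dict.insert, PySem.Dict.getD, PySem.Dict.get?]
      rw [List.foldl_cons, hstep, ih _ _ _ _ ht]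
      simp [solutionScore_cons, PySem.Str.pyGet?, PySem.Dict.mk.injEq, PySem.List.pyGet?,
        PySem.List.pyIdx?]
      split_ifs <;> omega
    · have hstep : solutionStep (PySem.Dict.mk [("RT", v1), ("CF", v2), ("JM", v3), ("AN", v4)]) ("NA", c)
          = PySem.Dict.mk [("RT", v1), ("CF", v2), ("JM", v3), ("AN", v4 + (c - 4) * (-1))] := by
        simp [solutionStep, PySem.Dict.insert, PySem.Dict.getD, PySem.Dict.get?]
      rw [List.foldl_cons, hstep, ih _ _ _ _ ht]
      simp [solutionScore_cons, PySem.Str.pyGet?, PySem.Dict.mk.injEq, PySem.List.pyGet?,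
        PySem.List.pyIdx?]
      split_ifs <;> omega

-- ===== VERDICT (by name: the statement is the Claim_ definition above) =====
theorem solution_spec : Claim_equal_solution := by
  intro survey choices _ hpre
  unfold Spec_solution solution solution_alt
  rw [show PySem.Dict.ofList [(("RT" : String), (0 : Int)), ("CF", 0), ("JM", 0), ("AN", 0)] =
        PySem.Dict.mk [("RT", 0), ("CF", 0), ("JM", 0), ("AN", 0)] from rfl]
  rw [solution_loop (survey.zip choices) 0 0 0 0 hpre]
  simp only [List.foldl_cons, List.foldl_nil, List.map_cons, List.map_nil,
    List.nil_append, List.cons_append]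
  norm_num [PySem.Str.pyGet?, PySem.List.pyGet?, PySem.List.pyIdx?]
  constructor
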